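-- pv_equiv track=rewrite | github.com/nds5yf/THzCAI | Research/PythonScripts/drawH.py | ycoor
-- ===== SOURCE A (Python) =====
-- def ycoor(n, li, x):
--
--     if n == 0:
--         return li
--
--     else:
--         dif = pow(2, x)
--         li = li + li
--         temp = li[:]
--         for i in range (0, len(li)):
--             temp[i] = temp[i] + dif
--         li = li + temp
--
--         return ycoor(n-1, li, x+1)
-- ===== SOURCE B (Python) =====
-- def ycoor(n, li, x):
--     if not li:
--         return []
--     # Build the offset table iteratively (it quadruples per level, sharing the
--     # unshifted halves), then emit one block per offset, memoizing blocks since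
--     # each offset value recurs many times.
--     offsets = [0]
--     for k in range(n):
--         d = 2 ** (x + k)
--         shifted = [o + d for o in offsets]
--         offsets = offsets + offsets + shifted + shifted
--     out = []
--     cache = {}
--     for o in offsets:
--         b = cache.get(o)
--         if b is None:
--             b = [v + o for v in li]
--             cache[o] = b
--         out.extend(b)
--     return out
-- ===== Notes on version B (the rewrite author's own statement) =====
-- stated objective: alternative
-- what changed: B replaces A's recursion that rebuilds the whole list at every level by an iteratively built offset table (quadrupling per level) plus one final pass that emits one block per offset, memoizing blocks in a dict since each offset value recurs 2^n times.
-- outside the precondition, e.g. on ycoor(-1, [], 0): A raises RecursionError, B returns []; on ycoor(1, [0], -1): A returns [0, 0, 0.5, 0.5], B returns [0, 0, 0.5, 0.5]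
import Mathlib
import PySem

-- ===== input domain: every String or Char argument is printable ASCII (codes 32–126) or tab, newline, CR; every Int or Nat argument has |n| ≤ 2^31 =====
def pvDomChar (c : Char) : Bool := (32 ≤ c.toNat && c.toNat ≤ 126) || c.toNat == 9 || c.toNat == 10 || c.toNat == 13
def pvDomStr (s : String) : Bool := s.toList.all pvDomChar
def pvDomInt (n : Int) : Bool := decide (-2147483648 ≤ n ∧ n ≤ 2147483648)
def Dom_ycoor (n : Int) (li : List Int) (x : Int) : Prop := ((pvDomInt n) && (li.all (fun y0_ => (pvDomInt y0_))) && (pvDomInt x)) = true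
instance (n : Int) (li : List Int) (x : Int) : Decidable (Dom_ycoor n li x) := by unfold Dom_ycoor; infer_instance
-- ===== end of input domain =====

-- B builds the offset table iteratively, then emits one block per offset with
-- memoized blocks, instead of A's recursion rebuilding the whole list per level
-- (objective: alternative decomposition, same asymptotic cost).

-- ===== PORT A =====
-- the 'for i in range(0, len(li)): temp[i] = temp[i] + dif' loop of A
def ycoorAdd (l : List Int) (dif : Int) : List Int :=
  match l with
  | [] => []
  | a :: t => (a + dif) :: ycoorAdd t dif

def ycoor (n : Int) (li : List Int) (x : Int) : List Int :=
  if n = 0 then li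
  else if n < 0 then li   -- totality guard only: Python recurses without bound here (outside Pre_)
  else
    let dif : Int := 2 ^ x.toNat
    let li2 := li ++ li
    let temp := ycoorAdd li2 dif
    ycoor (n - 1) (li2 ++ temp) (x + 1)
termination_by n.toNat
decreasing_by omega

-- ===== PORT B =====
def ycoor_alt (n : Int) (li : List Int) (x : Int) : List Int :=
  if li = [] then []
  else
  let offsets := (List.range n.toNat).foldl
    (fun (acc : List Int) (k : Nat) =>
      let d : Int := 2 ^ (x + (k : Int)).toNat
      let shifted := acc.map (· + d)
      acc ++ acc ++ shifted ++ shifted)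
    [0]
  (offsets.foldl
    (fun (p : List Int × PySem.Dict Int (List Int)) o =>
      match p.2.get? o with
      | some b => (p.1 ++ b, p.2)
      | none =>
        let b := li.map (fun v => v + o)
        (p.1 ++ b, p.2.insert o b))
    ([], PySem.Dict.empty)).1

-- ===== PRECONDITION & SPEC =====
-- Pre_ excludes n < 0 (A's unbounded recursion raises RecursionError) and
-- n > 0 with x < 0 on a nonempty list (Python pow(2, x) is then a float, so A's result leaves List Int).
def Pre_ycoor (n : Int) (li : List Int) (x : Int) : Prop := 0 ≤ n ∧ (0 ≤ x ∨ n = 0 ∨ li = [])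
instance (n : Int) (li : List Int) (x : Int) : Decidable (Pre_ycoor n li x) := by unfold Pre_ycoor; infer_instance

def pvWitness_ycoor : Int × List Int × Int := (2, [0, 3], 1)

def Spec_ycoor (n : Int) (li : List Int) (x : Int) (out : List Int) : Prop := out = ycoor_alt n li x
instance (n : Int) (li : List Int) (x : Int) (out : List Int) : Decidable (Spec_ycoor n li x out) := by unfold Spec_ycoor; infer_instance

-- ===== CLAIM (what is proved, stated in full; the proofs are below) =====
def Claim_equal_ycoor : Prop := ∀ (n : Int) (li : List Int) (x : Int), Dom_ycoor n li x → Pre_ycoor n li x → Spec_ycoor n li x (ycoor n li x)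

-- ===== LEMMAS AND PROOFS =====

-- one level of A's recurrence: L ↦ (L ++ L) ++ (L ++ L) + d
def pvStep (d : Int) (l : List Int) : List Int :=
  (l ++ l) ++ (l ++ l).map (· + d)

-- the common recurrence, m levels starting at exponent x
def pvF : Nat → List Int → Int → List Int
  | 0, l, _ => l
  | m + 1, l, x => pvF m (pvStep (2 ^ x.toNat) l) (x + 1)

lemma ycoorAdd_eq_map (l : List Int) (d : Int) : ycoorAdd l d = l.map (· + d) := by
  induction l with
  | nil => rfl
  | cons a t ih => simp [ycoorAdd, ih]

lemma ycoor_eq_pvF (m : Nat) : ∀ (n : Int), 0 ≤ n → n.toNat = m →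
    ∀ (li : List Int) (x : Int), ycoor n li x = pvF m li x := by
  induction m with
  | zero =>
    intro n hn hm li x
    have : n = 0 := by omega
    simp [ycoor, this, pvF]
  | succ m ih =>
    intro n hn hm li x
    have h0 : ¬ n = 0 := by omega
    have h1 : ¬ n < 0 := by omega
    rw [ycoor]
    simp only [h0, h1, if_false]
    rw [ycoorAdd_eq_map, ih (n - 1) (by omega) (by omega)]
    rfl

lemma pvF_succ_back (m : Nat) : ∀ (li : List Int) (x : Int),
    pvF (m + 1) li x = pvStep (2 ^ (x + (m : Int)).toNat) (pvF m li x) := by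
  induction m with
  | zero => intro li x; simp [pvF]
  | succ m ih =>
    intro li x
    have : pvF (m + 1 + 1) li x = pvF (m + 1) (pvStep (2 ^ x.toNat) li) (x + 1) := rfl
    rw [this, ih]
    have hx : x + 1 + (m : Int) = x + ((m + 1 : Nat) : Int) := by push_cast; ring
    rw [hx]
    rfl

-- applying all offsets to li
def pvG (li O : List Int) : List Int := O.flatMap (fun o => li.map (fun v => v + o))

lemma pvG_append (li O1 O2 : List Int) : pvG li (O1 ++ O2) = pvG li O1 ++ pvG li O2 := by
  simp [pvG]

lemma pvG_map_add (li O : List Int) (e : Int) :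
    pvG li (O.map (· + e)) = (pvG li O).map (· + e) := by
  induction O with
  | nil => rfl
  | cons o t ih =>
    simp only [List.map_cons, pvG, List.flatMap_cons] at *
    rw [ih]
    simp only [List.map_map, List.map_append]
    congr 1
    apply List.map_congr_left
    intro v _
    simp [add_assoc]

lemma pvG_offStep (li O : List Int) (d : Int) :
    pvG li (O ++ O ++ O.map (· + d) ++ O.map (· + d)) = pvStep d (pvG li O) := by
  rw [pvG_append, pvG_append, pvG_append, pvG_map_add]
  simp [pvStep, List.append_assoc]

-- the memoizing output loop emits exactly one block per offset
lemma pvCacheFold (li : List Int) : ∀ (O out : List Int) (c : PySem.Dict Int (List Int)),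
    (∀ o b, c.get? o = some b → b = li.map (fun v => v + o)) →
    (O.foldl
      (fun (p : List Int × PySem.Dict Int (List Int)) o =>
        match p.2.get? o with
        | some b => (p.1 ++ b, p.2)
        | none =>
          let b := li.map (fun v => v + o)
          (p.1 ++ b, p.2.insert o b))
      (out, c)).1 = out ++ pvG li O := by
  intro O
  induction O with
  | nil => intro out c _; simp [pvG]
  | cons o t ih =>
    intro out c hc
    simp only [List.foldl_cons]
    cases hg : c.get? o with
    | some b =>
      rw [ih (out ++ b) c hc, hc o b hg]
      simp [pvG, List.append_assoc]
    | none =>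
      rw [ih _ _ ?_]
      · simp [pvG, List.append_assoc]
      · intro o' b' h'
        rw [PySem.Dict.get?_insert] at h'
        by_cases he : o' = o
        · simp [he] at h'; simp [← h', he]
        · exact hc o' b' (by simpa [he] using h')

lemma pvG_eq_pvF (li : List Int) (x : Int) (m : Nat) :
    pvG li ((List.range m).foldl
      (fun (acc : List Int) (k : Nat) =>
        let d : Int := 2 ^ (x + (k : Int)).toNat
        let shifted := acc.map (· + d)
        acc ++ acc ++ shifted ++ shifted)
      [0]) = pvF m li x := by
  induction m with
  | zero => simp [pvG, pvF]
  | succ m ih =>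
    rw [List.range_succ, List.foldl_append]
    simp only [List.foldl_cons, List.foldl_nil]
    rw [pvG_offStep, ih, pvF_succ_back]

lemma pvF_nil (m : Nat) : ∀ (x : Int), pvF m [] x = [] := by
  induction m with
  | zero => intro x; rfl
  | succ m ih => intro x; simpa [pvF, pvStep] using ih (x + 1)

lemma ycoor_alt_eq_pvF (n : Int) (li : List Int) (x : Int) :
    ycoor_alt n li x = pvF n.toNat li x := by
  unfold ycoor_alt
  by_cases hnil : li = []
  · simp [hnil, pvF_nil]
  · simp only [hnil, if_false]
    rw [pvCacheFold li _ [] PySem.Dict.empty (by simp [PySem.Dict.get?_empty])]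
    rw [List.nil_append]
    exact pvG_eq_pvF li x n.toNat

-- ===== VERDICT (by name: the statement is the Claim_ definition above) =====
theorem ycoor_spec : Claim_equal_ycoor := by
  intro n li x _ hpre
  unfold Spec_ycoor
  rw [ycoor_eq_pvF n.toNat n hpre.1 rfl, ycoor_alt_eq_pvF]
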